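-- pv_equiv track=rewrite | github.com/junzel/uci-statnlp | hw2/lm.py | combination_gen
-- ===== SOURCE A (Python) =====
-- def combination_gen(sentence, comb=3):
--     """Generate all possible combination in a sentence with the length of combination"""
--     output = []
--     for i in range(-comb+1, len(sentence)+comb-2, 1): # [len(sentence) + 2 - comb + 1] iterations
--         tup = []
--         for j in range(comb):
--             if i+j < 0:
--                 tup.append('START_OF_SENTENCE')
--             elif i+j < len(sentence):
--                 tup.append(sentence[i+j])
--             else:
--                 tup.append('END_OF_SENTENCE')
--         output.append(tuple(tup))
--     return output
-- ===== SOURCE B (Python) =====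
-- def combination_gen(sentence, comb=3):
--     """Generate all possible combination in a sentence with the length of combination"""
--     padded = ['START_OF_SENTENCE'] * (comb - 1) + list(sentence) + ['END_OF_SENTENCE'] * (2 * comb - 3)
--     return [tuple(padded[i:i + comb]) for i in range(len(sentence) + 2 * comb - 3)]
-- ===== Notes on version B (the rewrite author's own statement) =====
-- stated objective: simpler
-- what changed: Replaces the nested loop with a per-element 3-way conditional by materializing one padded list (comb-1 START markers, the sentence, 2*comb-3 END markers) and cutting it into fixed-width slices.
-- outside the precondition, e.g. on combination_gen(['a', 'b', 'c', 'd', 'e', 'f'], -1): A returns [()], B returns [('a', 'b', 'c', 'd', 'e')]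
import Mathlib
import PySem

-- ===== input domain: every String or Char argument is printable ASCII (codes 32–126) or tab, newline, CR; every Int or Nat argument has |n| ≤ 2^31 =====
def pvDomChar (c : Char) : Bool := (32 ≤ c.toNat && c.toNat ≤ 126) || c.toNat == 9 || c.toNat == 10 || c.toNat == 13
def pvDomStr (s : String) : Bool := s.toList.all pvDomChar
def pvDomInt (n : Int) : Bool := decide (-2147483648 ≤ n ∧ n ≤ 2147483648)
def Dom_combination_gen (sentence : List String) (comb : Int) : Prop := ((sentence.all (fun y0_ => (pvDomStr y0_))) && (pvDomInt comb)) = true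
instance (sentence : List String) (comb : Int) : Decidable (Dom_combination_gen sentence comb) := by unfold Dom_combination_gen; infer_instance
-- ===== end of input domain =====

-- B builds the whole padded sequence once and takes fixed-width slices, instead of A's
-- nested loop deciding START/word/END element by element.

-- ===== PORT A =====
def combination_gen (sentence : List String) (comb : Int) : List (List String) :=
  (PySem.List.pyRange (-comb + 1) (PySem.List.len sentence + comb - 2) 1).foldl
    (fun output i =>
      output ++ [(PySem.List.pyRange 0 comb 1).foldl
        (fun tup j =>
          tup ++ [if i + j < 0 then "START_OF_SENTENCE"
                  else if i + j < PySem.List.len sentence then PySem.List.pyGetD sentence (i + j) ""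
                  else "END_OF_SENTENCE"]) []]) []

-- ===== PORT B =====
-- Source B's local 'padded' list, as a helper
def pvPadded (sentence : List String) (comb : Int) : List String :=
  List.replicate (comb - 1).toNat "START_OF_SENTENCE" ++ sentence ++
    List.replicate (2 * comb - 3).toNat "END_OF_SENTENCE"

def combination_gen_alt (sentence : List String) (comb : Int) : List (List String) :=
  (PySem.List.pyRange 0 (PySem.List.len sentence + 2 * comb - 3) 1).map
    (fun i => PySem.List.slice (pvPadded sentence comb) (some i) (some (i + comb)))

-- ===== PRECONDITION & SPEC =====
-- Pre_ restricts to the natural domain comb ≥ 0 (a window width): for negative comb A still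
-- returns (a sentence-length-dependent list of empty tuples, an accident of its range
-- arithmetic) and B's slicing wraps the negative stop; neither value is specified behaviour.
def Pre_combination_gen (sentence : List String) (comb : Int) : Prop := 0 ≤ comb
instance (sentence : List String) (comb : Int) : Decidable (Pre_combination_gen sentence comb) := by unfold Pre_combination_gen; infer_instance
def pvWitness_combination_gen : List String × Int := (["the", "cat", "sat"], 3)
def Spec_combination_gen (sentence : List String) (comb : Int) (out : List (List String)) : Prop := out = combination_gen_alt sentence comb
instance (sentence : List String) (comb : Int) (out : List (List String)) : Decidable (Spec_combination_gen sentence comb out) := by unfold Spec_combination_gen; infer_instance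

-- ===== CLAIM (what is proved, stated in full; the proofs are below) =====
def Claim_equal_combination_gen : Prop := ∀ (sentence : List String) (comb : Int), Dom_combination_gen sentence comb → Pre_combination_gen sentence comb → Spec_combination_gen sentence comb (combination_gen sentence comb)

-- ===== LEMMAS AND PROOFS =====

-- One window of A's inner loop equals the corresponding fixed-width slice of B's padded list.
theorem combination_gen_window (sentence : List String) (c k : Nat)
    (hk : (k : Int) < (sentence.length : Int) + 2 * c - 3) :
    (PySem.List.pyRange 0 (c : Int) 1).foldl
      (fun tup j =>
        tup ++ [if (-(c : Int) + 1 + (k : Int)) + j < 0 then "START_OF_SENTENCE"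
                else if (-(c : Int) + 1 + (k : Int)) + j < PySem.List.len sentence then
                  PySem.List.pyGetD sentence ((-(c : Int) + 1 + (k : Int)) + j) ""
                else "END_OF_SENTENCE"]) []
    = PySem.List.slice
        (List.replicate ((c : Int) - 1).toNat "START_OF_SENTENCE" ++ sentence ++
          List.replicate (2 * (c : Int) - 3).toNat "END_OF_SENTENCE")
        (some (k : Int)) (some ((k : Int) + (c : Int))) := by
  rw [PySem.List.foldl_append_singleton_eq_map, PySem.List.pyRange_one,
    PySem.List.slice_natCast_add, List.map_map]
  simp only [List.nil_append, Int.sub_zero, Int.toNat_natCast]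
  apply List.ext_getElem
  · simp
    omega
  · intro j hj1 hj2
    have hjc : j < c := by simpa using hj1
    simp only [List.getElem_map, List.getElem_range, Function.comp_apply,
      List.getElem_take, List.getElem_drop, PySem.List.len_eq]
    by_cases h1 : (-(c : Int) + 1 + (k : Int)) + ((0:Int) + (j:Int)) < 0
    · rw [if_pos h1, List.getElem_append_left (by simp; omega),
        List.getElem_append_left (by simp; omega), List.getElem_replicate]
    · rw [if_neg h1]
      by_cases h2 : (-(c : Int) + 1 + (k : Int)) + ((0:Int) + (j:Int)) < (sentence.length : Int)
      · rw [if_pos h2,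
          List.getElem_append_left (by simp; omega),
          List.getElem_append_right (by simp; omega),
          PySem.List.pyGetD_eq_getElem _ _ (by omega) (by omega)]
        congr 1
        simp
        omega
      · rw [if_neg h2, List.getElem_append_right (by simp; omega), List.getElem_replicate]

-- ===== VERDICT (by name: the statement is the Claim_ definition above) =====
theorem combination_gen_spec : Claim_equal_combination_gen := by
  intro sentence comb _ hc
  obtain ⟨c, rfl⟩ := Int.eq_ofNat_of_zero_le hc
  unfold Spec_combination_gen combination_gen combination_gen_alt pvPadded
  rw [PySem.List.foldl_append_singleton_eq_map,
    PySem.List.pyRange_one (-(c:Int) + 1) (PySem.List.len sentence + (c:Int) - 2),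
    PySem.List.pyRange_one 0 (PySem.List.len sentence + 2 * (c:Int) - 3),
    List.map_map, List.map_map, List.nil_append]
  have hN : ((PySem.List.len sentence + (c : Int) - 2) - (-(c : Int) + 1)).toNat
      = ((PySem.List.len sentence + 2 * (c : Int) - 3) - 0).toNat := by
    simp only [PySem.List.len_eq]; omega
  rw [hN]
  apply List.map_congr_left
  intro k hkm
  have hk : (k : Int) < (sentence.length : Int) + 2 * c - 3 := by
    simp only [PySem.List.len_eq] at hkm
    have := List.mem_range.mp hkm
    omega
  simpa using combination_gen_window sentence c k hk
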